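-- pv_equiv track=rewrite | github.com/XiaoqianZhu1997/cs61a | exam/exam_prep01.py | longest_increasing_suffix
-- ===== SOURCE A (Python) =====
-- def longest_increasing_suffix(n):
--
--        """Return the longest increasing suffix of a positive integer n.
--        >>> longest_increasing_suffix(63134)
--        134
--        >>> longest_increasing_suffix(233)
--        3
--        >>> longest_increasing_suffix(5689)
--        5689
--        >>> longest_increasing_suffix(568901)  # Note: 01 is the suffix, displayed as 1
--        1
--        """
--
--        m, suffix, k = 10, 0, 1
--        while n: # 其实就是说明此时n>10，因为当n<10时，再经过一次迭代就需要直接输出结果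
--               n, last = n // 10, n % 10
--               if m > last:
--                      m, suffix, k = last, suffix + last * k, 10 * k
--               else:
--                      return suffix
--        return suffix
-- ===== SOURCE B (Python) =====
-- def longest_increasing_suffix(n):
--     if n < 10:
--         return n
--     rest, last = divmod(n, 10)
--     if rest % 10 < last:
--         return longest_increasing_suffix(rest) * 10 + last
--     return last
-- ===== Notes on version B (the rewrite author's own statement) =====
-- stated objective: simpler
-- what changed: Replaced A's while loop that tracks three accumulators (previous digit m, suffix value, place value k) with a direct recursion on divmod(n, 10) that compares the two lowest digits and rebuilds the suffix as lis(n//10)*10 + last.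
-- outside the precondition, e.g. on longest_increasing_suffix(-5): A returns 5, B returns -5
import Mathlib
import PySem

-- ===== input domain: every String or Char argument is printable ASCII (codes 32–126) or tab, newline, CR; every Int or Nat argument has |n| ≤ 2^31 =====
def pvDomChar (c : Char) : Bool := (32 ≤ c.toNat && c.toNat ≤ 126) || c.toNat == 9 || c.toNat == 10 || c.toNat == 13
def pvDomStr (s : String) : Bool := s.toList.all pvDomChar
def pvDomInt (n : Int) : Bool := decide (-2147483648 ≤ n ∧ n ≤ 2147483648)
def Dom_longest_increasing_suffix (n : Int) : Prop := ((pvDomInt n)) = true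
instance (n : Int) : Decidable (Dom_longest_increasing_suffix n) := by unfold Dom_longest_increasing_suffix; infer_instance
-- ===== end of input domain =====

-- B is a direct structural recursion on divmod(n, 10) instead of A's bottom-up loop with (m, suffix, k) accumulators (objective: simpler).

-- ===== PORT A =====
-- A's while loop; the fuel only makes the same computation total (n.natAbs + 1 iterations always suffice on the admitted inputs).
def pvLoopA (fuel : Nat) (n m suffix k : Int) : Int :=
  match fuel with
  | 0 => suffix
  | f + 1 =>
    if n ≠ 0 then
      let n' := PySem.Int.floordiv n 10
      let last := PySem.Int.mod n 10
      if m > last then pvLoopA f n' last (suffix + last * k) (10 * k)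
      else suffix
    else suffix

def longest_increasing_suffix (n : Int) : Int := pvLoopA (n.natAbs + 1) n 10 0 1

-- ===== PORT B =====
def longest_increasing_suffix_alt (n : Int) : Int :=
  if h : n < 10 then n
  else
    let rest := PySem.Int.floordiv n 10
    let last := PySem.Int.mod n 10
    if PySem.Int.mod rest 10 < last then longest_increasing_suffix_alt rest * 10 + last
    else last
termination_by n.natAbs
decreasing_by
  rw [PySem.Int.floordiv_eq_ediv_of_pos (by norm_num)]
  omega

-- ===== PRECONDITION & SPEC =====
-- Pre_ excludes negative n: the docstring specifies a positive integer; on negative n A's floor-division loop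
-- returns an accidental value (e.g. 5 for -5) that is not the function's purpose, so negatives are outside the claim.
def Pre_longest_increasing_suffix (n : Int) : Prop := 0 ≤ n
instance (n : Int) : Decidable (Pre_longest_increasing_suffix n) := by unfold Pre_longest_increasing_suffix; infer_instance
def pvWitness_longest_increasing_suffix : Int := 63134

def Spec_longest_increasing_suffix (n : Int) (out : Int) : Prop := out = longest_increasing_suffix_alt n
instance (n : Int) (out : Int) : Decidable (Spec_longest_increasing_suffix n out) := by unfold Spec_longest_increasing_suffix; infer_instance

-- ===== CLAIM (what is proved, stated in full; the proofs are below) =====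
def Claim_equal_longest_increasing_suffix : Prop := ∀ (n : Int), Dom_longest_increasing_suffix n → Pre_longest_increasing_suffix n → Spec_longest_increasing_suffix n (longest_increasing_suffix n)

-- ===== LEMMAS AND PROOFS =====

lemma alt_small {n : Int} (h : n < 10) : longest_increasing_suffix_alt n = n := by
  rw [longest_increasing_suffix_alt]; simp [h]

lemma alt_step {n : Int} (h : ¬ n < 10) :
    longest_increasing_suffix_alt n =
      if n / 10 % 10 < n % 10 then longest_increasing_suffix_alt (n / 10) * 10 + n % 10
      else n % 10 := by
  rw [longest_increasing_suffix_alt]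
  simp only [h, dite_false]
  rw [PySem.Int.floordiv_eq_ediv_of_pos (by norm_num), PySem.Int.mod_eq_emod_of_pos (by norm_num),
      PySem.Int.mod_eq_emod_of_pos (by norm_num)]

lemma loopA_eq (f : Nat) : ∀ (n m s k : Int), 0 ≤ n → n < (f : Int) →
    pvLoopA f n m s k =
      if n = 0 then s
      else if PySem.Int.mod n 10 < m then longest_increasing_suffix_alt n * k + s else s := by
  induction f with
  | zero => intro n m s k hn hf; omega
  | succ f ih =>
    intro n m s k hn hf
    by_cases h0 : n = 0
    · simp [pvLoopA, h0]
    · have hn1 : 1 ≤ n := by omega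
      rw [pvLoopA]
      simp only [h0, if_true, ne_eq, not_false_eq_true]
      rw [PySem.Int.floordiv_eq_ediv_of_pos (by norm_num), PySem.Int.mod_eq_emod_of_pos (by norm_num)] at *
      set n' := n / 10 with hn'
      set last := n % 10 with hlast
      by_cases hc : m > last
      · rw [if_pos hc, ih n' last (s + last * k) (10 * k) (by omega) (by omega)]
        simp only [if_false]
        rw [if_pos hc]
        by_cases hsm : n < 10
        · have h1 : n' = 0 := by omega
          have h2 : last = n := by omega
          rw [alt_small hsm, if_pos h1]
          rw [h2]; ring
        · have h1 : n' ≠ 0 := by omega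
          have hmod : PySem.Int.mod n' 10 = n' % 10 := PySem.Int.mod_eq_emod_of_pos (by norm_num)
          rw [if_neg h1, hmod, alt_step hsm]
          by_cases hd : n' % 10 < last
          · rw [if_pos hd, if_pos hd]; ring
          · rw [if_neg hd, if_neg hd]; ring
      · rw [if_neg hc]
        simp only [if_false]
        rw [if_neg (by omega : ¬ last < m)]

-- ===== VERDICT (by name: the statement is the Claim_ definition above) =====
theorem longest_increasing_suffix_spec : Claim_equal_longest_increasing_suffix := by
  intro n _ hpre
  unfold Spec_longest_increasing_suffix longest_increasing_suffix
  rw [loopA_eq (n.natAbs + 1) n 10 0 1 hpre (by omega)]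
  by_cases h0 : n = 0
  · rw [if_pos h0, h0, alt_small (by norm_num)]
  · rw [if_neg h0, if_pos (by
      rw [PySem.Int.mod_eq_emod_of_pos (by norm_num)]; omega)]
    ring
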